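-- pv_equiv track=rewrite | github.com/eVoluto25/evoluto-system1 | gpt_module.py | suddividi_testo_in_blocchi
-- ===== SOURCE A (Python) =====
-- def suddividi_testo_in_blocchi(testo, max_token=1500):
--     parole = testo.split()
--     blocchi = []
--     blocco_corrente = []
--
--     for parola in parole:
--         blocco_corrente.append(parola)
--         if len(blocco_corrente) >= max_token:
--             blocchi.append(" ".join(blocco_corrente))
--             blocco_corrente = []
--
--     if blocco_corrente:
--         blocchi.append(" ".join(blocco_corrente))
--
--     return blocchi
-- ===== SOURCE B (Python) =====
-- def suddividi_testo_in_blocchi(testo, max_token=1500):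
--     parole = testo.split()
--     passo = max(max_token, 1)
--     return [" ".join(parole[i:i + passo]) for i in range(0, len(parole), passo)]
-- ===== Notes on version B (the rewrite author's own statement) =====
-- stated objective: idiomatic
-- what changed: Replaces the accumulator list with per-word appends, in-loop flush and trailing flush by a single slice comprehension striding over word indices with step max(max_token, 1).
import Mathlib
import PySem

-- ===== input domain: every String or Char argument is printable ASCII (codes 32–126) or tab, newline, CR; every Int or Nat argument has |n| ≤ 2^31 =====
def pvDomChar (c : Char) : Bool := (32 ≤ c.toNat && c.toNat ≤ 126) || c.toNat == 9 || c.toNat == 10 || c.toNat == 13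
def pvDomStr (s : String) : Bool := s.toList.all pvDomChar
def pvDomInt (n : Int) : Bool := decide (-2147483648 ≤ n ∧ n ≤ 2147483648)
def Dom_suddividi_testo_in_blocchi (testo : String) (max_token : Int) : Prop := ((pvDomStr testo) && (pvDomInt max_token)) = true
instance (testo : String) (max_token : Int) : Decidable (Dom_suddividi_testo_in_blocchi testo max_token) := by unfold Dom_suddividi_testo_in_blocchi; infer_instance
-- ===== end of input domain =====

-- B replaces A's accumulator-and-flush loop by a stride/slice comprehension (idiomatic; same cost).

-- ===== PORT A =====
def suddividi_testo_in_blocchi (testo : String) (max_token : Int) : List String :=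
  let parole := PySem.Str.split₀ testo
  let st := parole.foldl
    (fun (s : List String × List String) parola =>
      let blocco := s.2 ++ [parola]
      if max_token ≤ (blocco.length : Int) then (s.1 ++ [PySem.Str.join " " blocco], [])
      else (s.1, blocco))
    ([], [])
  if st.2.isEmpty then st.1 else st.1 ++ [PySem.Str.join " " st.2]

-- ===== PORT B =====
def suddividi_testo_in_blocchi_alt (testo : String) (max_token : Int) : List String :=
  let parole := PySem.Str.split₀ testo
  let passo := max max_token 1
  (PySem.List.pyRange 0 (parole.length : Int) passo).map
    (fun i => PySem.Str.join " " (PySem.List.slice parole (some i) (some (i + passo))))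

-- ===== PRECONDITION & SPEC =====
def Spec_suddividi_testo_in_blocchi (testo : String) (max_token : Int) (out : List String) : Prop := out = suddividi_testo_in_blocchi_alt testo max_token
instance (testo : String) (max_token : Int) (out : List String) : Decidable (Spec_suddividi_testo_in_blocchi testo max_token out) := by unfold Spec_suddividi_testo_in_blocchi; infer_instance

-- ===== CLAIM (what is proved, stated in full; the proofs are below) =====
def Claim_equal_suddividi_testo_in_blocchi : Prop := ∀ (testo : String) (max_token : Int), Dom_suddividi_testo_in_blocchi testo max_token → Spec_suddividi_testo_in_blocchi testo max_token (suddividi_testo_in_blocchi testo max_token)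

-- ===== LEMMAS AND PROOFS =====

-- canonical chunking of a word list into blocks of m+1 words
def pvChunks (m : Nat) : List String → List String
  | [] => []
  | w :: ws => PySem.Str.join " " (w :: ws.take m) :: pvChunks m (ws.drop m)
termination_by l => l.length
decreasing_by
  simp only [List.length_drop, List.length_cons]; omega

lemma pvChunks_ne_nil (m : Nat) (l : List String) (h : l ≠ []) :
    pvChunks m l = PySem.Str.join " " (l.take (m+1)) :: pvChunks m (l.drop (m+1)) := by
  cases l with
  | nil => exact absurd rfl h
  | cons w ws => simp [pvChunks]

lemma pvA_loop (mt : Int) (m : Nat) (hm : max mt 1 = (m : Int) + 1) :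
    ∀ (ws acc cur : List String), cur.length ≤ m →
    (let st := ws.foldl
      (fun (s : List String × List String) parola =>
        let blocco := s.2 ++ [parola]
        if mt ≤ (blocco.length : Int) then (s.1 ++ [PySem.Str.join " " blocco], [])
        else (s.1, blocco)) (acc, cur);
     if st.2.isEmpty then st.1 else st.1 ++ [PySem.Str.join " " st.2])
    = acc ++ pvChunks m (cur ++ ws) := by
  intro ws
  induction ws with
  | nil =>
    intro acc cur hcur
    cases cur with
    | nil => simp [pvChunks]
    | cons c cs =>
      simp only [List.length_cons] at hcur
      simp [pvChunks, List.take_of_length_le (by omega : cs.length ≤ m),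
        List.drop_eq_nil_of_le (by omega : cs.length ≤ m)]
  | cons p ps ih =>
    intro acc cur hcur
    simp only [List.foldl_cons]
    by_cases h : mt ≤ ((cur ++ [p]).length : Int)
    · have h' : mt ≤ (cur.length : Int) + 1 := by
        simpa using h
      have hlen : cur.length = m := by omega
      simp only [h, if_pos]
      have := ih (acc ++ [PySem.Str.join " " (cur ++ [p])]) [] (by simp)
      simp only [List.nil_append] at this
      rw [this]
      rw [pvChunks_ne_nil m (cur ++ p :: ps) (by simp)]
      have htake : (cur ++ p :: ps).take (m+1) = cur ++ [p] := by
        rw [List.take_append, List.take_of_length_le (by omega)]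
        simp [hlen]
      have hdrop : (cur ++ p :: ps).drop (m+1) = ps := by
        rw [List.drop_append, List.drop_eq_nil_of_le (by omega)]
        simp [hlen]
      rw [htake, hdrop]
      simp
    · have h' : ¬ mt ≤ (cur.length : Int) + 1 := by
        simpa using h
      have hlen : cur.length + 1 ≤ m := by omega
      simp only [h, if_false]
      have := ih acc (cur ++ [p]) (by simp; omega)
      rw [this]
      simp

lemma pvB_nat (m : Nat) :
    ∀ (ws : List String),
    (List.range ((ws.length + m) / (m+1))).map
      (fun k => PySem.Str.join " " (List.take (m+1) (List.drop ((m+1)*k) ws)))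
    = pvChunks m ws := by
  intro ws
  induction ws using pvChunks.induct m with
  | case1 => simp [pvChunks, Nat.div_eq_of_lt (by omega : m < m + 1)]
  | case2 w ws ih =>
    have hK : (( (w :: ws).length + m) / (m+1)) = ((ws.drop m).length + m) / (m+1) + 1 := by
      simp only [List.length_cons, List.length_drop]
      by_cases hws : m ≤ ws.length
      · have h1 : ws.length + 1 + m = (ws.length) + (m+1) := by omega
        have h2 : ws.length - m + m = ws.length := by omega
        rw [h1, Nat.add_div_right _ (by omega), h2]
      · have h1 : ws.length - m = 0 := by omega
        have h2 : ws.length + 1 + m = (ws.length) + (m+1) := by omega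
        rw [h1, h2, Nat.add_div_right _ (by omega), Nat.div_eq_of_lt (by omega),
          Nat.div_eq_of_lt (by omega)]
    rw [hK, List.range_succ_eq_map, List.map_cons, List.map_map]
    rw [pvChunks]
    simp only [List.length_drop] at ih
    congr 1
    rw [← ih]
    simp only [List.length_drop]
    apply List.map_congr_left
    intro k _
    simp only [Function.comp]
    have hd : List.drop ((m+1)*k) (List.drop m ws)
        = List.drop ((m+1)*k + (m+1)) (w :: ws) := by
      rw [show List.drop m ws = List.drop (m+1) (w :: ws) from rfl, List.drop_drop]
      congr 1
      omega
    rw [hd, Nat.mul_succ]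

lemma pvB_eq (mt : Int) (m : Nat) (hm : max mt 1 = (m : Int) + 1) (ws : List String) :
    (PySem.List.pyRange 0 (ws.length : Int) (max mt 1)).map
      (fun i => PySem.Str.join " " (PySem.List.slice ws (some i) (some (i + max mt 1))))
    = pvChunks m ws := by
  rw [hm]
  rw [PySem.List.pyRange_of_pos _ _ (by omega : (0:Int) < (m:Int)+1)]
  have hcnt : (if (0:Int) < (ws.length : Int)
      then (((ws.length : Int) - 0 + ((m:Int)+1) - 1) / ((m:Int)+1)).toNat else 0)
      = (ws.length + m) / (m+1) := by
    by_cases h : (0:Int) < (ws.length : Int)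
    · rw [if_pos h,
        show ((ws.length : Int) - 0 + ((m:Int)+1) - 1) = ((ws.length + m : Nat) : Int) by push_cast; ring,
        show ((m:Int)+1) = (((m+1 : Nat)) : Int) by push_cast; ring,
        ← Int.natCast_div, Int.toNat_natCast]
    · have hws : ws.length = 0 := by omega
      rw [if_neg h, hws, Nat.div_eq_of_lt (by omega)]
  rw [hcnt, List.map_map]
  rw [← pvB_nat m ws]
  apply List.map_congr_left
  intro k _
  simp only [Function.comp]
  rw [show (0:Int) + ((m:Int)+1) * (k:Int) + ((m:Int)+1)
        = (((m+1)*k : Nat) : Int) + ((m+1 : Nat) : Int) by push_cast; ring,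
      show (0:Int) + ((m:Int)+1) * (k:Int) = (((m+1)*k : Nat) : Int) by push_cast; ring,
      PySem.List.slice_natCast_add]

-- ===== VERDICT (by name: the statement is the Claim_ definition above) =====
theorem suddividi_testo_in_blocchi_spec : Claim_equal_suddividi_testo_in_blocchi := by
  intro testo max_token _
  unfold Spec_suddividi_testo_in_blocchi
  unfold suddividi_testo_in_blocchi suddividi_testo_in_blocchi_alt
  set parole := PySem.Str.split₀ testo with hp
  obtain ⟨m, hm⟩ : ∃ m : Nat, max max_token 1 = (m : Int) + 1 := by
    refine ⟨(max max_token 1).toNat - 1, by omega⟩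
  simp only []
  rw [pvB_eq max_token m hm parole]
  exact pvA_loop max_token m hm parole [] [] (by simp)
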